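-- pv_equiv track=rewrite | github.com/latentnick/ha-vacation-mode | features.py | compute_time_in_state
-- ===== SOURCE A (Python) =====
-- def compute_time_in_state(series):
--     """Count consecutive steps each value has been unchanged."""
--     counts = []
--     count = 0
--     prev = None
--     for val in series:
--         if val != prev:
--             count = 1
--         else:
--             count += 1
--         counts.append(count)
--         prev = val
--     return counts
-- ===== SOURCE B (Python) =====
-- def compute_time_in_state(series):
--     """Count consecutive steps each value has been unchanged."""
--     runs = []
--     for val in series:
--         if runs and runs[-1][0] == val:
--             runs[-1][1] += 1
--         else:
--             runs.append([val, 1])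
--     out = []
--     for _, length in runs:
--         out.extend(range(1, length + 1))
--     return out
-- ===== Notes on version B (the rewrite author's own statement) =====
-- stated objective: alternative
-- what changed: Replaces A's single pass with prev/count running state by a two-phase group-then-enumerate decomposition: first build the maximal runs of equal adjacent values as (value, length) pairs, then emit 1..length for each run.
import Mathlib
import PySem

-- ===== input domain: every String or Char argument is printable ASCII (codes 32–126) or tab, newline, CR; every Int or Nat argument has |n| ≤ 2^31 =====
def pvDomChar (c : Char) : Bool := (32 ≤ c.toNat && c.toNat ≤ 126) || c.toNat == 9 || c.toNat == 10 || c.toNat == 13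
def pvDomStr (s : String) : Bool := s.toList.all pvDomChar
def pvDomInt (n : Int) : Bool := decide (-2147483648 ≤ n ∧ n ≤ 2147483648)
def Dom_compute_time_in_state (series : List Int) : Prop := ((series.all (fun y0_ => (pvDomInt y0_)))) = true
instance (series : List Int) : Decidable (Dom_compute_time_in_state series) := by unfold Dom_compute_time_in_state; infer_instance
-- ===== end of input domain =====

-- B replaces A's prev/count running-state loop by a two-phase decomposition (build (value, length) runs, then emit 1..length per run); objective: alternative, same O(n) cost.

-- ===== PORT A =====
-- A's loop over `series` carrying (count, prev); counts are emitted in order (cons instead of append).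
def pvALoop (series : List Int) (prev : Option Int) (count : Int) : List Int :=
  match series with
  | [] => []
  | v :: rest =>
    let c := if some v ≠ prev then 1 else count + 1
    c :: pvALoop rest (some v) c

def compute_time_in_state (series : List Int) : List Int :=
  pvALoop series none 0

-- ===== PORT B =====
-- Source B's first loop body: append [val,1], or increment the last run's length if its value matches.
def pvAddVal (runs : List (Int × Int)) (v : Int) : List (Int × Int) :=
  match runs with
  | [] => [(v, 1)]
  | [(u, n)] => if u = v then [(u, n + 1)] else [(u, n), (v, 1)]
  | r :: rs => r :: pvAddVal rs v

def compute_time_in_state_alt (series : List Int) : List Int :=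
  let runs := series.foldl pvAddVal []
  runs.foldl (fun out p => out ++ PySem.List.pyRange 1 (p.2 + 1) 1) []

-- ===== PRECONDITION & SPEC =====
def Spec_compute_time_in_state (series : List Int) (out : List Int) : Prop := out = compute_time_in_state_alt series
instance (series : List Int) (out : List Int) : Decidable (Spec_compute_time_in_state series out) := by unfold Spec_compute_time_in_state; infer_instance

-- ===== CLAIM (what is proved, stated in full; the proofs are below) =====
def Claim_equal_compute_time_in_state : Prop := ∀ (series : List Int), Dom_compute_time_in_state series → Spec_compute_time_in_state series (compute_time_in_state series)

-- ===== LEMMAS AND PROOFS =====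

-- The canonical run decomposition (tail-recursive), the common normal form of both ports.
def pvRunsP : List Int → List (Int × Int)
  | [] => []
  | v :: rest =>
    match pvRunsP rest with
    | [] => [(v, 1)]
    | (u, n) :: gs => if u = v then (v, n + 1) :: gs else (v, 1) :: (u, n) :: gs

-- prepend a run of value v carrying m already-seen copies onto a decomposition
def pvConsRun (v m : Int) (gs : List (Int × Int)) : List (Int × Int) :=
  match gs with
  | [] => [(v, m + 1)]
  | (u, n) :: gs' => if u = v then (v, n + m + 1) :: gs' else (v, m + 1) :: (u, n) :: gs'

-- enumeration 1+s, 2+s, …, n+s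
def pvE (n s : Int) : List Int := (List.range n.toNat).map (fun k : Nat => ((k : Int) + 1 + s))

def pvF (gs : List (Int × Int)) : List Int := gs.flatMap (fun p => PySem.List.pyRange 1 (p.2 + 1) 1)

-- what A's loop emits, as a function of the run decomposition of the remaining input
def pvShape (p : Option Int) (c : Int) (gs : List (Int × Int)) : List Int :=
  match gs with
  | [] => []
  | (u, n) :: gs' => pvE n (if some u = p then c else 0) ++ pvF gs'

lemma pvE_pyRange (n s : Int) :
    (PySem.List.pyRange 1 (n + 1) 1).map (fun i => i + s) = pvE n s := by
  unfold pvE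
  rw [PySem.List.pyRange_one, List.map_map, show n + 1 - 1 = n from by ring]
  apply List.map_congr_left
  intro k _
  simp only [Function.comp_apply]
  ring

lemma pvE_succ (n s : Int) (hn : 0 ≤ n) : pvE (n + 1) s = (s + 1) :: pvE n (s + 1) := by
  unfold pvE
  have h : (n + 1).toNat = n.toNat + 1 := by omega
  rw [h, List.range_succ_eq_map]
  simp only [List.map_cons, List.map_map, Nat.cast_zero]
  congr 1
  · ring
  · apply List.map_congr_left
    intro k _
    simp only [Function.comp_apply, Nat.succ_eq_add_one]
    push_cast
    ring

lemma pvE_one (s : Int) : pvE 1 s = [s + 1] := by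
  rw [show (1 : Int) = 0 + 1 by norm_num, pvE_succ 0 s (by norm_num)]
  simp [pvE]

lemma pvF_cons (u n : Int) (gs : List (Int × Int)) :
    pvF ((u, n) :: gs) = pvE n 0 ++ pvF gs := by
  have h := pvE_pyRange n 0
  simp at h
  simp [pvF, h]

lemma pvRunsP_consRun (v : Int) (rest : List Int) :
    pvRunsP (v :: rest) = pvConsRun v 0 (pvRunsP rest) := by
  cases h : pvRunsP rest with
  | nil => simp [pvRunsP, pvConsRun, h]
  | cons q gs =>
    obtain ⟨u, n⟩ := q
    by_cases huv : u = v <;> simp [pvRunsP, pvConsRun, h, huv]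

lemma pvRunsP_cons_head (v : Int) (rest : List Int) :
    ∃ n gs, pvRunsP (v :: rest) = (v, n) :: gs := by
  rw [pvRunsP_consRun]
  cases h : pvRunsP rest with
  | nil => exact ⟨1, [], by simp [pvConsRun]⟩
  | cons q gs =>
    obtain ⟨u, n⟩ := q
    by_cases huv : u = v
    · exact ⟨n + 0 + 1, gs, by simp [pvConsRun, huv]⟩
    · exact ⟨0 + 1, (u, n) :: gs, by simp [pvConsRun, huv]⟩

lemma pvRunsP_pos : ∀ (series : List Int) (p : Int × Int), p ∈ pvRunsP series → 1 ≤ p.2 := by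
  intro series
  induction series with
  | nil => intro p hp; simp [pvRunsP] at hp
  | cons v rest ih =>
    intro p hp
    cases h : pvRunsP rest with
    | nil =>
      have hrw : pvRunsP (v :: rest) = [(v, 1)] := by simp [pvRunsP, h]
      rw [hrw] at hp
      simp only [List.mem_singleton] at hp
      rw [hp]
    | cons q gs =>
      obtain ⟨u, n⟩ := q
      have hn : 1 ≤ n := ih (u, n) (by rw [h]; exact List.mem_cons_self ..)
      have hrw : pvRunsP (v :: rest) =
          if u = v then (v, n + 1) :: gs else (v, 1) :: (u, n) :: gs := by
        simp [pvRunsP, h]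
      rw [hrw] at hp
      split_ifs at hp with huv
      · rcases List.mem_cons.mp hp with h1 | h1
        · rw [h1]; show (1 : Int) ≤ n + 1; omega
        · exact ih p (by rw [h]; exact List.mem_cons_of_mem _ h1)
      · rcases List.mem_cons.mp hp with h1 | h1
        · rw [h1]
        · rcases List.mem_cons.mp h1 with h2 | h2
          · rw [h2]; exact hn
          · exact ih p (by rw [h]; exact List.mem_cons_of_mem _ h2)

-- B's first loop: updating the last run ignores the front of the accumulator.
lemma pvAddVal_append : ∀ (rs : List (Int × Int)) (p : Int × Int) (v : Int),
    pvAddVal (rs ++ [p]) v = rs ++ pvAddVal [p] v := by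
  intro rs
  induction rs with
  | nil => intro p v; simp
  | cons q rs' ih =>
    intro p v
    cases rs' with
    | nil => obtain ⟨a, b⟩ := p; simp [pvAddVal]
    | cons x t =>
      have := ih p v
      simp only [List.cons_append, pvAddVal] at *
      rw [this]

lemma pvFoldl_addVal_append : ∀ (series : List Int) (acc : List (Int × Int)) (p : Int × Int),
    List.foldl pvAddVal (acc ++ [p]) series = acc ++ List.foldl pvAddVal [p] series := by
  intro series
  induction series with
  | nil => intro acc p; simp
  | cons v rest ih =>
    intro acc p
    obtain ⟨u, n⟩ := p
    simp only [List.foldl_cons, pvAddVal_append]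
    by_cases huv : u = v
    · subst huv
      have e : pvAddVal [(u, n)] u = [(u, n + 1)] := by simp [pvAddVal]
      rw [e]
      exact ih acc (u, n + 1)
    · have e : pvAddVal [(u, n)] v = [(u, n), (v, 1)] := by simp [pvAddVal, huv]
      rw [e, show acc ++ [(u, n), (v, 1)] = (acc ++ [(u, n)]) ++ [(v, 1)] by simp,
        ih (acc ++ [(u, n)]) (v, 1)]
      have h2 := ih [(u, n)] (v, 1)
      simp only [List.cons_append, List.nil_append] at h2
      rw [h2]
      simp

-- B's first loop computes the canonical run decomposition.
lemma pvFoldl_addVal_runsP : ∀ (rest : List Int) (v m : Int),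
    List.foldl pvAddVal [(v, m + 1)] rest = pvConsRun v m (pvRunsP rest) := by
  intro rest
  induction rest with
  | nil => intro v m; simp [pvRunsP, pvConsRun]
  | cons w rest' ih =>
    intro v m
    rw [List.foldl_cons]
    by_cases hvw : v = w
    · subst hvw
      have e : pvAddVal [(v, m + 1)] v = [(v, (m + 1) + 1)] := by simp [pvAddVal]
      rw [e, ih v (m + 1), pvRunsP_consRun]
      cases h : pvRunsP rest' with
      | nil => simp [pvConsRun]; ring
      | cons q gs =>
        obtain ⟨u, n⟩ := q
        by_cases huv : u = v <;> simp [pvConsRun, huv] <;> ring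
    · have hwv : ¬ w = v := fun hh => hvw hh.symm
      have e : pvAddVal [(v, m + 1)] w = [(v, m + 1), (w, 1)] := by simp [pvAddVal, hvw]
      rw [e, show ([(v, m + 1), (w, 1)] : List (Int × Int)) = [(v, m + 1)] ++ [(w, 1)] from rfl,
        pvFoldl_addVal_append rest' [(v, m + 1)] (w, 1),
        show ((w, 1) : Int × Int) = (w, 0 + 1) by norm_num, ih w 0, ← pvRunsP_consRun]
      obtain ⟨n, gs, hg⟩ := pvRunsP_cons_head w rest'
      rw [hg]
      simp [pvConsRun, hwv]

-- A's loop against the run decomposition: the first run continues prev with shift c.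
lemma pvALoop_runsP : ∀ (series : List Int) (p : Option Int) (c : Int),
    pvALoop series p c = pvShape p c (pvRunsP series) := by
  intro series
  induction series with
  | nil => intro p c; simp [pvALoop, pvRunsP, pvShape]
  | cons w rest ih =>
    intro p c
    have hc' : (if some w ≠ p then (1 : Int) else c + 1) = (if some w = p then c else 0) + 1 := by
      by_cases h : some w = p <;> simp [h]
    simp only [pvALoop, hc']
    set s : Int := if some w = p then c else 0 with hs
    rw [ih (some w) (s + 1), pvRunsP_consRun]
    cases h : pvRunsP rest with
    | nil =>
      have e1 : pvConsRun w 0 ([] : List (Int × Int)) = [(w, 1)] := by norm_num [pvConsRun]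
      have e2 : pvShape p c [(w, 1)] = pvE 1 s ++ pvF [] := by simp [pvShape, hs]
      rw [e1, e2, pvE_one]
      simp [pvShape, pvF]
    | cons q gs =>
      obtain ⟨u, n⟩ := q
      have hn : 1 ≤ n := pvRunsP_pos rest (u, n) (by rw [h]; exact List.mem_cons_self ..)
      by_cases huw : u = w
      · subst huw
        have e1 : pvConsRun u 0 ((u, n) :: gs) = (u, n + 1) :: gs := by norm_num [pvConsRun]
        have e2 : pvShape (some u) (s + 1) ((u, n) :: gs) = pvE n (s + 1) ++ pvF gs := by
          simp [pvShape]
        have e3 : pvShape p c ((u, n + 1) :: gs) = pvE (n + 1) s ++ pvF gs := by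
          simp [pvShape, hs]
        rw [e1, e2, e3, pvE_succ n s (by omega)]
        simp
      · have e1 : pvConsRun w 0 ((u, n) :: gs) = (w, 1) :: (u, n) :: gs := by
          norm_num [pvConsRun, huw]
        have hsw : ¬ some u = some w := by simp [huw]
        have e2 : pvShape (some w) (s + 1) ((u, n) :: gs) = pvE n 0 ++ pvF gs := by
          simp [pvShape, hsw]
        have e3 : pvShape p c ((w, 1) :: (u, n) :: gs) = pvE 1 s ++ pvF ((u, n) :: gs) := by
          simp [pvShape, hs]
        rw [e1, e2, e3, pvE_one, pvF_cons]
        simp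

lemma pvB_runsP (series : List Int) : series.foldl pvAddVal [] = pvRunsP series := by
  cases series with
  | nil => simp [pvRunsP]
  | cons v rest =>
    rw [List.foldl_cons,
      show pvAddVal [] v = [(v, 0 + 1)] by simp [pvAddVal],
      pvFoldl_addVal_runsP rest v 0, ← pvRunsP_consRun]

lemma pvShape_none (gs : List (Int × Int)) :
    pvShape none 0 gs = gs.flatMap (fun p => PySem.List.pyRange 1 (p.2 + 1) 1) := by
  cases gs with
  | nil => simp [pvShape]
  | cons q gs'
 =>
    obtain ⟨u, n⟩ := q
    have h := pvE_pyRange n 0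
    simp only [add_zero] at h
    simp only [pvShape, reduceCtorEq, if_false]
    rw [← h]
    simp [pvF]

-- ===== VERDICT (by name: the statement is the Claim_ definition above) =====
theorem compute_time_in_state_spec : Claim_equal_compute_time_in_state := by
  intro series _
  unfold Spec_compute_time_in_state compute_time_in_state compute_time_in_state_alt
  rw [PySem.List.foldl_append_eq_flatMap, pvB_runsP, pvALoop_runsP series none 0,
    List.nil_append]
  exact pvShape_none (pvRunsP series)
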